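-- pv_equiv track=rewrite | github.com/rick12000/vocalance | vocalance/app/utils/number_parser.py | remove_number_conjunctions
-- ===== SOURCE A (Python) =====
-- from typing import Dict, Optional, Set
--
-- NUMBER_WORDS: Dict[str, int] = {
--     "zero": 0,
--     "one": 1,
--     "two": 2,
--     "three": 3,
--     "four": 4,
--     "five": 5,
--     "six": 6,
--     "seven": 7,
--     "eight": 8,
--     "nine": 9,
--     "ten": 10,
--     "eleven": 11,
--     "twelve": 12,
--     "thirteen": 13,
--     "fourteen": 14,
--     "fifteen": 15,
--     "sixteen": 16,
--     "seventeen": 17,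
--     "eighteen": 18,
--     "nineteen": 19,
--     "twenty": 20,
--     "thirty": 30,
--     "forty": 40,
--     "fifty": 50,
--     "sixty": 60,
--     "seventy": 70,
--     "eighty": 80,
--     "ninety": 90,
-- }
--
-- SCALE_WORDS: Set[str] = {"hundred", "thousand", "million", "billion", "trillion"}
--
-- def remove_number_conjunctions(text: str) -> str:
--     """Remove 'and' when it appears between number words.
--
--     Examples: 'four hundred and nine' -> 'four hundred nine'
--
--     Args:
--         text: Text to clean.
--
--     Returns:
--         Text with number conjunctions removed.
--     """
--     if not isinstance(text, str):
--         return text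
--
--     words = text.lower().split()
--     all_number_words = NUMBER_WORDS.keys() | SCALE_WORDS
--
--     filtered_words = []
--     for i, word in enumerate(words):
--         if word == "and":
--             prev_is_number = i > 0 and words[i - 1] in all_number_words
--             next_is_number = i < len(words) - 1 and words[i + 1] in all_number_words
--             if prev_is_number and next_is_number:
--                 continue
--         filtered_words.append(word)
--
--     return " ".join(filtered_words)
-- ===== SOURCE B (Python) =====
-- from typing import Dict, Set
--
-- NUMBER_WORDS: Dict[str, int] = {
--     "zero": 0, "one": 1, "two": 2, "three": 3, "four": 4, "five": 5,
--     "six": 6, "seven": 7, "eight": 8, "nine": 9, "ten": 10, "eleven": 11,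
--     "twelve": 12, "thirteen": 13, "fourteen": 14, "fifteen": 15,
--     "sixteen": 16, "seventeen": 17, "eighteen": 18, "nineteen": 19,
--     "twenty": 20, "thirty": 30, "forty": 40, "fifty": 50, "sixty": 60,
--     "seventy": 70, "eighty": 80, "ninety": 90,
-- }
--
-- SCALE_WORDS: Set[str] = {"hundred", "thousand", "million", "billion", "trillion"}
--
--
-- def remove_number_conjunctions(text: str) -> str:
--     """Remove 'and' when it appears between number words (streaming single pass)."""
--     if not isinstance(text, str):
--         return text
--
--     number_words = NUMBER_WORDS.keys() | SCALE_WORDS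
--
--     out = []
--     prev = None            # previous word seen (or None at the start)
--     has_pending = False    # an 'and' whose fate is still undecided
--     pending_prev = None    # the word that preceded that pending 'and'
--     for word in text.lower().split():
--         if word == "and":
--             if has_pending:
--                 out.append("and")  # its successor is 'and', which is not a number word
--             has_pending = True
--             pending_prev = prev
--         else:
--             if has_pending:
--                 if not (pending_prev in number_words and word in number_words):
--                     out.append("and")
--                 has_pending = False
--             out.append(word)
--         prev = word
--     if has_pending:
--         out.append("and")
--
--     return " ".join(out)
-- ===== Notes on version B (the rewrite author's own statement) =====
-- stated objective: alternative
-- what changed: Replaced the indexed neighbour-lookup loop (words[i-1]/words[i+1] via enumerate) by a streaming single pass that carries the previous word and a pending conjunction whose preceding word is recorded, resolving the pending conjunction when its successor arrives.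
import Mathlib
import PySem

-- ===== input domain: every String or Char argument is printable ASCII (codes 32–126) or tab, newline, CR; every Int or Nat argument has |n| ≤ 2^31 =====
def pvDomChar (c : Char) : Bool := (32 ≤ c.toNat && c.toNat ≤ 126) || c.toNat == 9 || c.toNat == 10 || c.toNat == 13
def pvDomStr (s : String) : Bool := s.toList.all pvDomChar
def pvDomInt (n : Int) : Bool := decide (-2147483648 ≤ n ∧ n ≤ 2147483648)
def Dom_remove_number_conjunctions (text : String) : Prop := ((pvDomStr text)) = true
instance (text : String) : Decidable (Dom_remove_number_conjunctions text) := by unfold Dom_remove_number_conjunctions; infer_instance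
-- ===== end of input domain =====

-- B replaces A's indexed neighbour lookups (words[i-1]/words[i+1] via enumerate) by a
-- streaming single pass carrying the previous word and a pending conjunction (objective: alternative).

-- ===== PORT A =====
-- module-level constants shared by both Pythons
def pvNUMBER_WORDS : PySem.Dict String Int := PySem.Dict.ofList
  [("zero", 0), ("one", 1), ("two", 2), ("three", 3), ("four", 4), ("five", 5),
   ("six", 6), ("seven", 7), ("eight", 8), ("nine", 9), ("ten", 10), ("eleven", 11),
   ("twelve", 12), ("thirteen", 13), ("fourteen", 14), ("fifteen", 15),
   ("sixteen", 16), ("seventeen", 17), ("eighteen", 18), ("nineteen", 19),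
   ("twenty", 20), ("thirty", 30), ("forty", 40), ("fifty", 50), ("sixty", 60),
   ("seventy", 70), ("eighty", 80), ("ninety", 90)]

def pvSCALE_WORDS : PySem.Set String :=
  PySem.Set.ofList ["hundred", "thousand", "million", "billion", "trillion"]

-- all_number_words = NUMBER_WORDS.keys() | SCALE_WORDS (both Pythons compute this set)
def pvAllNumberWords : PySem.Set String :=
  PySem.Set.union (PySem.Set.ofList (PySem.Dict.keys pvNUMBER_WORDS)) pvSCALE_WORDS

def pvIsNum (w : String) : Bool := PySem.Set.contains pvAllNumberWords w

-- A's loop body: one step of 'for i, word in enumerate(words)'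
def pvStepA (words : List String) (acc : List String) (iw : Int × String) : List String :=
  if iw.2 == "and"
     && (decide (0 < iw.1) && pvIsNum (PySem.List.pyGetD words (iw.1 - 1) ""))
     && (decide (iw.1 < (words.length : Int) - 1) && pvIsNum (PySem.List.pyGetD words (iw.1 + 1) ""))
  then acc
  else acc ++ [iw.2]

def remove_number_conjunctions (text : String) : String :=
  let words := PySem.Str.split₀ (PySem.Str.lower text)
  let filtered := (PySem.List.enumerate words).foldl (pvStepA words) []
  PySem.Str.join " " filtered

-- ===== PORT B =====
-- 'x in number_words' where x is prev (a word or None at the start)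
def pvIsNumO : Option String → Bool
  | some w => pvIsNum w
  | none => false

-- B's loop body; state = (out, prev, has_pending, pending_prev)
def pvStepB (st : List String × Option String × Bool × Option String) (w : String) :
    List String × Option String × Bool × Option String :=
  let (out, prev, hasP, pPrev) := st
  if w == "and" then
    ((if hasP then out ++ ["and"] else out), some w, true, prev)
  else
    (((if hasP && !(pvIsNumO pPrev && pvIsNum w) then out ++ ["and"] else out) ++ [w]),
     some w, false, pPrev)

-- the trailing 'if has_pending: out.append("and")'
def pvFlush (st : List String × Option String × Bool × Option String) : List String :=
  if st.2.2.1 then st.1 ++ ["and"] else st.1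

def remove_number_conjunctions_alt (text : String) : String :=
  let st := (PySem.Str.split₀ (PySem.Str.lower text)).foldl pvStepB ([], none, false, none)
  PySem.Str.join " " (pvFlush st)

-- ===== PRECONDITION & SPEC =====
def Spec_remove_number_conjunctions (text : String) (out : String) : Prop := out = remove_number_conjunctions_alt text
instance (text : String) (out : String) : Decidable (Spec_remove_number_conjunctions text out) := by unfold Spec_remove_number_conjunctions; infer_instance

-- ===== CLAIM (what is proved, stated in full; the proofs are below) =====
def Claim_equal_remove_number_conjunctions : Prop := ∀ (text : String), Dom_remove_number_conjunctions text → Spec_remove_number_conjunctions text (remove_number_conjunctions text)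

-- ===== LEMMAS AND PROOFS =====

-- reference filter: remove 'and' when the words adjacent to it are both number words
def pvSpec : Option String → List String → List String
  | _, [] => []
  | prev, w :: ws =>
    if w == "and" && pvIsNumO prev && pvIsNumO ws.head?
    then pvSpec (some w) ws
    else w :: pvSpec (some w) ws

-- the word preceding position i in the full word list
def pvPrevAt (words : List String) (i : Nat) : Option String :=
  if i = 0 then none else words[i - 1]?

theorem pvIsNum_and : pvIsNum "and" = false := by decide

theorem pvALoop (words : List String) :
    ∀ (ws : List String) (i : Nat), words.drop i = ws →
      ∀ acc, (PySem.List.enumerate ws (i : Int)).foldl (pvStepA words) acc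
        = acc ++ pvSpec (pvPrevAt words i) ws := by
  intro ws
  induction ws with
  | nil =>
    intro i _ acc
    simp [PySem.List.enumerate_nil, pvSpec]
  | cons w rest ih =>
    intro i hdrop acc
    have hi : i < words.length := by
      by_contra h
      simp [List.drop_eq_nil_of_le (by omega : words.length ≤ i)] at hdrop
    have hdrop' : words.drop (i + 1) = rest := by
      have := congrArg List.tail hdrop
      simpa [List.tail_drop] using this
    have hgetw : words[i]? = some w := by
      have : (words.drop i)[0]? = words[i + 0]? := List.getElem?_drop
      simp [hdrop] at this
      simpa using this.symm
    -- previous-word test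
    have hprev : (decide (0 < (i : Int)) && pvIsNum (PySem.List.pyGetD words ((i : Int) - 1) ""))
        = pvIsNumO (pvPrevAt words i) := by
      cases i with
      | zero => simp [pvPrevAt, pvIsNumO]
      | succ k =>
        have hk : k < words.length := by omega
        have hcast : ((k + 1 : Nat) : Int) - 1 = (k : Int) := by push_cast; ring_nf
        have hg : PySem.List.pyGetD words ((k : Int)) "" = words[k] :=
          PySem.List.pyGetD_eq_getElem words "" (by positivity) (by exact_mod_cast hk)
        have hsome : words[k]? = some words[k] := List.getElem?_eq_getElem hk
        simp [hg, pvPrevAt, hsome, pvIsNumO]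
    -- next-word test
    have hnext : (decide ((i : Int) < (words.length : Int) - 1)
          && pvIsNum (PySem.List.pyGetD words ((i : Int) + 1) ""))
        = pvIsNumO rest.head? := by
      cases rest with
      | nil =>
        have hle : words.length ≤ i + 1 := by
          by_contra h
          have : (words.drop (i+1)).length = 0 := by rw [hdrop']; rfl
          simp [List.length_drop] at this
          omega
        have : ¬ ((i : Int) < (words.length : Int) - 1) := by omega
        simp [this, pvIsNumO]
      | cons n rest' =>
        have hlen : i + 1 < words.length := by
          have : (words.drop (i+1)).length = words.length - (i+1) := List.length_drop
          rw [hdrop'] at this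
          simp at this
          omega
        have hget : words[i+1]? = some n := by
          have : (words.drop (i+1))[0]? = words[(i+1) + 0]? := List.getElem?_drop
          simp [hdrop'] at this
          simpa using this.symm
        have hg : PySem.List.pyGetD words ((i : Int) + 1) "" = n := by
          have h1 : PySem.List.pyGetD words (((i + 1 : Nat) : Int)) "" = words[i+1] :=
            PySem.List.pyGetD_eq_getElem words "" (by positivity) (by exact_mod_cast hlen)
          have h2 : words[i+1] = n := by
            have := List.getElem?_eq_getElem hlen
            rw [hget] at this
            exact (Option.some.inj this).symm
          have hcast : ((i + 1 : Nat) : Int) = (i : Int) + 1 := by push_cast; ring_nf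
          rw [hcast] at h1
          rw [h1, h2]
        have : ((i : Int) < (words.length : Int) - 1) := by omega
        simp [this, hg, pvIsNumO]
    have hprevSucc : pvPrevAt words (i + 1) = some w := by
      simp [pvPrevAt, hgetw]
    rw [PySem.List.enumerate_cons]
    simp only [List.foldl_cons]
    have hcast1 : (i : Int) + 1 = ((i + 1 : Nat) : Int) := by push_cast; ring
    rw [hcast1, ih (i + 1) hdrop']
    unfold pvStepA
    simp only []
    rw [hprev, hnext, hprevSucc]
    by_cases hc : (w == "and" && pvIsNumO (pvPrevAt words i) && pvIsNumO rest.head?) = true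
    · simp only [pvSpec, hc]
      have hw : w = "and" := by
        have := hc
        simp at this
        exact this.1.1
      simp [hw]
    · simp [pvSpec, hc]
  
theorem pvBLoop :
    ∀ (ws : List String) (out : List String) (prev pPr : Option String),
      pvFlush (ws.foldl pvStepB (out, prev, false, pPr)) = out ++ pvSpec prev ws
      ∧ pvFlush (ws.foldl pvStepB (out, some "and", true, pPr)) = out ++ pvSpec pPr ("and" :: ws) := by
  intro ws
  induction ws with
  | nil =>
    intro out prev pPr
    constructor
    · simp [pvFlush, pvSpec]
    · simp [pvFlush, pvSpec, pvIsNumO]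
  | cons w rest ih =>
    intro out prev pPr
    constructor
    · by_cases hw : w = "and"
      · subst hw
        simp only [List.foldl_cons, pvStepB]
        simpa [pvSpec] using (ih out prev prev).2
      · have hbeq : (w == "and") = false := by simpa using hw
        simp only [List.foldl_cons, pvStepB, hbeq, Bool.false_and, Bool.false_eq_true,
          if_false]
        rw [(ih (out ++ [w]) (some w) pPr).1]
        simp [pvSpec, hbeq]
    · by_cases hw : w = "and"
      · subst hw
        simp only [List.foldl_cons, pvStepB, beq_self_eq_true, ite_true]
        rw [(ih (out ++ ["and"]) (some "and") (some "and")).2]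
        simp [pvSpec, pvIsNumO, pvIsNum_and]
      · have hbeq : (w == "and") = false := by simpa using hw
        simp only [List.foldl_cons, pvStepB]
        rw [if_neg (by simp [hbeq])]
        simp only [Bool.true_and]
        rw [(ih _ (some w) pPr).1]
        cases pPr with
        | none => simp [pvSpec, hbeq, pvIsNumO]
        | some p =>
          by_cases hp : pvIsNum p = true <;> by_cases hq : pvIsNum w = true <;>
            simp [pvSpec, hbeq, pvIsNumO, hp, hq]

-- ===== VERDICT (by name: the statement is the Claim_ definition above) =====
theorem remove_number_conjunctions_spec : Claim_equal_remove_number_conjunctions := by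
  intro text _
  unfold Spec_remove_number_conjunctions remove_number_conjunctions remove_number_conjunctions_alt
  dsimp only
  set words := PySem.Str.split₀ (PySem.Str.lower text) with hw
  have hA := pvALoop words words 0 (by simp) []
  have hB := (pvBLoop words [] none none).1
  have hprev0 : pvPrevAt words 0 = none := by simp [pvPrevAt]
  rw [hprev0] at hA
  simp only [List.nil_append, Nat.cast_zero] at hA hB
  rw [hA, hB]
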